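-- pv_equiv track=rewrite | github.com/Heo-Donghyuk/ProblemSolving | 프로그래머스/1/68935. 3진법 뒤집기/3진법 뒤집기.py | decToTri
-- ===== SOURCE A (Python) =====
-- def decToTri(num):
--     k, res = 0, ''
--     while 3**k<num:
--         k+=1
--     while k+1:
--         res+=str(num//(3**k))
--         num = num%(3**k)
--         k-=1
--     return int(res)
-- ===== SOURCE B (Python) =====
-- def decToTri(num):
--     n, s = num, ''
--     while n > 1:
--         s = str(n % 3) + s
--         n //= 3
--     return int(str(n) + s)
-- ===== Notes on version B (the rewrite author's own statement) =====
-- stated objective: simpler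
-- what changed: A searches for the exponent K with a 3**k power loop and then extracts base-3 digits most-significant-first by repeated division/modulo with descending powers 3**k; B is a single least-significant-first repeated-division loop (n % 3, n //= 3) that prepends each digit to the string, with no power search and no large powers.
import Mathlib
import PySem

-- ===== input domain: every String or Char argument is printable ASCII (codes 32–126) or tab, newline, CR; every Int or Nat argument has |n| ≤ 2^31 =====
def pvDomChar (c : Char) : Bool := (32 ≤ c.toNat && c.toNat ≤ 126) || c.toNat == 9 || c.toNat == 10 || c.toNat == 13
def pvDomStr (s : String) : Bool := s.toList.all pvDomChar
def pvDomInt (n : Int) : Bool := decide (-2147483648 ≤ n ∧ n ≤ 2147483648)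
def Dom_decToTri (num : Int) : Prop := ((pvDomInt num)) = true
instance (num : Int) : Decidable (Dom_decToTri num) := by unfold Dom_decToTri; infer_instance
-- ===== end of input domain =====

-- B replaces A's 3**k power-search plus descending-power division loop by a single
-- least-significant-first repeated-division loop that prepends digits to the string (objective: simpler).

-- ===== PORT A =====
-- `while 3**k < num: k += 1`
def aFindK (num : Int) (k : Nat) : Nat :=
  if (3:Int)^k < num then aFindK num (k+1) else k
termination_by num.toNat - 3^k
decreasing_by
  have h1 : ((3:Nat)^k : Int) < num := by push_cast; omega
  have h2 : (3:Nat)^k < num.toNat := by omega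
  have _h3 : (3:Nat)^(k+1) = 3 * 3^k := by ring
  have h4 : 1 ≤ (3:Nat)^k := Nat.one_le_pow _ _ (by omega)
  omega

-- `while k+1: res += str(num//(3**k)); num = num%(3**k); k -= 1`
-- (the final iteration's `num = num % 1` is dead state and is dropped)
def aLoop : Nat → Int → List Char → List Char
  | k, num, res =>
    let res' := res ++ PySem.Int.toChars (PySem.Int.floordiv num ((3:Int)^k))
    match k with
    | 0 => res'
    | k'+1 => aLoop k' (PySem.Int.mod num ((3:Int)^(k'+1))) res'

def decToTri (num : Int) : Int :=
  let k := aFindK num 0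
  let res := aLoop k num []
  -- `int(res)`: res is always a nonempty decimal-digit string produced by str(), so int() never
  -- raises and the `.getD 0` default is never used.
  (PySem.Int.ofChars? res).getD 0

-- ===== PORT B =====
-- `while n > 1: s = str(n % 3) + s; n //= 3`
def bLoop (n : Int) (s : List Char) : Int × List Char :=
  if 1 < n then bLoop (PySem.Int.floordiv n 3) (PySem.Int.toChars (PySem.Int.mod n 3) ++ s)
  else (n, s)
termination_by n.toNat
decreasing_by
  rename_i h
  obtain ⟨m, rfl⟩ := Int.eq_ofNat_of_zero_le (show (0:Int) ≤ n by omega)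
  have _hm : 1 < m := by exact_mod_cast h
  have h1 : PySem.Int.floordiv (m:Int) 3 = ((m / 3 : Nat) : Int) := by
    exact_mod_cast PySem.Int.floordiv_natCast m 3
  rw [h1, Int.toNat_natCast, Int.toNat_natCast]
  exact Nat.div_lt_self (by omega) (by omega)

-- `return int(str(n) + s)`  (never raises: the argument is a str()-built digit string)
def decToTri_alt (num : Int) : Int :=
  let p := bLoop num []
  (PySem.Int.ofChars? (PySem.Int.toChars p.1 ++ p.2)).getD 0

-- ===== PRECONDITION & SPEC =====
def Spec_decToTri (num : Int) (out : Int) : Prop := out = decToTri_alt num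
instance (num : Int) (out : Int) : Decidable (Spec_decToTri num out) := by unfold Spec_decToTri; infer_instance

-- ===== CLAIM (what is proved, stated in full; the proofs are below) =====
def Claim_equal_decToTri : Prop := ∀ (num : Int), Dom_decToTri num → Spec_decToTri num (decToTri num)

-- ===== LEMMAS AND PROOFS =====

-- Both programs feed `int()` a decimal-digit string; A's may carry one more leading '0' than B's.
-- The key lemma `conv_zero` shows a leading '0' does not change `PySem.Int.ofChars?` on digit strings.

theorem strip_id (s : List Char) (h : ∀ c ∈ s, PySem.Int.isIntSpace c = false) :
    (List.dropWhile PySem.Int.isIntSpace (List.dropWhile PySem.Int.isIntSpace s).reverse).reverse = s := by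
  have h1 : List.dropWhile PySem.Int.isIntSpace s = s := by
    rw [List.dropWhile_eq_self_iff]
    intro hne
    simp [h _ (List.getElem_mem hne)]
  rw [h1]
  have h2 : List.dropWhile PySem.Int.isIntSpace s.reverse = s.reverse := by
    rw [List.dropWhile_eq_self_iff]
    intro hne
    simp only [List.length_reverse] at hne
    rw [List.getElem_reverse]
    have hm : s[s.length - 1] ∈ s := List.getElem_mem (by omega)
    simp [h _ hm]
  rw [h2, List.reverse_reverse]

theorem digit_mem (c : Char) (h : c.isDigit = true) :
    c ∈ ['0','1','2','3','4','5','6','7','8','9'] := by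
  simp only [Char.isDigit, Bool.and_eq_true, decide_eq_true_eq] at h
  have h1 : 48 ≤ c.toNat := UInt32.le_iff_toNat_le.mp h.1
  have h2 : c.toNat ≤ 57 := UInt32.le_iff_toNat_le.mp h.2
  have hc : c = Char.ofNat c.toNat := (Char.ofNat_toNat c).symm
  interval_cases hn : c.toNat <;> subst hc <;> decide

-- a leading '0' does not change int() on a nonempty digit string
theorem conv_zero (s : List Char) (h : ∀ c ∈ s, Char.isDigit c = true) (hne : s ≠ []) :
    PySem.Int.ofChars? ('0'::s) = PySem.Int.ofChars? s := by
  have hd1 : ∀ c ∈ ('0'::s), PySem.Int.isIntSpace c = false := by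
    intro c hc
    rcases List.mem_cons.mp hc with rfl | hm
    · rfl
    · have := digit_mem c (h c hm); fin_cases this <;> rfl
  have hd2 : ∀ c ∈ s, PySem.Int.isIntSpace c = false := fun c hc => hd1 c (List.mem_cons_of_mem _ hc)
  match s, hne with
  | c :: t, _ =>
    have hc := digit_mem c (h c (List.mem_cons_self))
    simp only [PySem.Int.ofChars?]
    rw [strip_id _ hd1, strip_id _ hd2]
    fin_cases hc <;> rfl

-- the decimal digit character of d
def dchar (d : Nat) : Char := Char.ofNat (48 + d)

-- m printed in base 3, zero-padded to width w (MSB first); both programs' strings have this shape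
def pad3 : Nat → Nat → List Char
  | 0, _ => []
  | w+1, m => dchar (m / 3^w) :: pad3 w (m % 3^w)

theorem toChars_small (q : Nat) (h : q < 3) : PySem.Int.toChars (q : Int) = [dchar q] := by
  interval_cases q <;> rfl

theorem pad3_ne_nil (w m : Nat) (h : 1 ≤ w) : pad3 w m ≠ [] := by
  match w, h with
  | w+1, _ => simp [pad3]

theorem pad3_digits (w m : Nat) (h : m < 3^w) : ∀ c ∈ pad3 w m, Char.isDigit c = true := by
  induction w generalizing m with
  | zero => simp [pad3]
  | succ w ih =>
    intro c hc
    rcases List.mem_cons.mp hc with rfl | hm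
    · have hq : m / 3^w < 3 := Nat.div_lt_of_lt_mul (by rw [← pow_succ]; exact h)
      interval_cases hq' : (m / 3^w) <;> decide
    · exact ih (m % 3^w) (Nat.mod_lt _ (Nat.pow_pos (by omega : (0:Nat) < 3))) c hm

theorem pad3_snoc (w m : Nat) :
    pad3 (w+2) m = pad3 (w+1) (m / 3) ++ [dchar (m % 3)] := by
  induction w generalizing m with
  | zero =>
    show dchar (m / 3^1) :: pad3 1 (m % 3^1) = (dchar (m / 3 / 3^0) :: pad3 0 (m / 3 % 3^0)) ++ [dchar (m % 3)]
    show dchar (m / 3^1) :: dchar (m % 3^1 / 3^0) :: pad3 0 (m % 3^1 % 3^0)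
        = (dchar (m / 3 / 3^0) :: pad3 0 (m / 3 % 3^0)) ++ [dchar (m % 3)]
    simp [pad3]
  | succ w ih =>
    show dchar (m / 3^(w+2)) :: pad3 (w+2) (m % 3^(w+2))
        = (dchar (m / 3 / 3^(w+1)) :: pad3 (w+1) (m / 3 % 3^(w+1))) ++ [dchar (m % 3)]
    have e1 : m / 3 / 3^(w+1) = m / 3^(w+2) := by
      rw [Nat.div_div_eq_div_mul]
      congr 1
      ring
    have e2 : m % 3^(w+2) % 3 = m % 3 := Nat.mod_mod_of_dvd _ ⟨3^(w+1), by ring⟩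
    have e3 : m % 3^(w+2) / 3 = m / 3 % 3^(w+1) := by
      conv_lhs => rw [show (3:Nat)^(w+2) = 3 * 3^(w+1) by ring]
      rw [Nat.mod_mul_right_div_self]
    rw [ih (m % 3^(w+2)), e1, e2, e3]
    simp

-- widening the pad by one just prepends a '0'
theorem pad3_widen (w m : Nat) (h : m < 3^w) :
    pad3 (w+1) m = '0' :: pad3 w m := by
  show dchar (m / 3^w) :: pad3 w (m % 3^w) = '0' :: pad3 w m
  rw [Nat.div_eq_of_lt h, Nat.mod_eq_of_lt h]
  rfl

theorem parse_pad3_down (w j m : Nat) (hw : 1 ≤ w) (h : m < 3^w) :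
    PySem.Int.ofChars? (pad3 (w+j) m) = PySem.Int.ofChars? (pad3 w m) := by
  induction j with
  | zero => rfl
  | succ j ih =>
    have hwj : m < 3^(w+j) := lt_of_lt_of_le h (Nat.pow_le_pow_right (by omega) (by omega))
    rw [show w + (j+1) = (w+j) + 1 by ring, pad3_widen _ _ hwj,
        conv_zero _ (pad3_digits _ _ hwj) (pad3_ne_nil _ _ (by omega))]
    exact ih

theorem parse_pad3_eq (w w' m : Nat) (hw : 1 ≤ w) (hw' : 1 ≤ w')
    (h : m < 3^w) (h' : m < 3^w') :
    PySem.Int.ofChars? (pad3 w m) = PySem.Int.ofChars? (pad3 w' m) := by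
  rcases Nat.le_total w w' with hle | hle
  · obtain ⟨j, rfl⟩ := Nat.exists_eq_add_of_le hle
    exact (parse_pad3_down w j m hw h).symm
  · obtain ⟨j, rfl⟩ := Nat.exists_eq_add_of_le hle
    exact parse_pad3_down w' j m hw' h'

-- ---- A-side characterisation ----

theorem aFindK_post (num : Int) (k : Nat) : ¬ ((3:Int)^(aFindK num k) < num) := by
  unfold aFindK
  split
  · exact aFindK_post num (k+1)
  · assumption
termination_by num.toNat - 3^k
decreasing_by
  rename_i h
  have h1 : ((3:Nat)^k : Int) < num := by push_cast; omega
  have h2 : (3:Nat)^k < num.toNat := by omega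
  have _h3 : (3:Nat)^(k+1) = 3 * 3^k := by ring
  have h4 : 1 ≤ (3:Nat)^k := Nat.one_le_pow _ _ (by omega)
  omega

theorem aLoop_eq (k : Nat) (m : Nat) (res : List Char) (h : m < 3^(k+1)) :
    aLoop k (m : Int) res = res ++ pad3 (k+1) m := by
  induction k generalizing m res with
  | zero =>
    show res ++ PySem.Int.toChars (PySem.Int.floordiv (m:Int) ((3:Int)^0)) = res ++ pad3 1 m
    have hfd : PySem.Int.floordiv (m:Int) ((3:Int)^0) = (m : Int) := by
      rw [PySem.Int.floordiv_eq_ediv_of_pos (by norm_num)]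
      simp
    have hp1 : pad3 1 m = [dchar m] := by simp [pad3]
    rw [hfd, toChars_small m (by simpa using h), hp1]
  | succ k ih =>
    show aLoop k (PySem.Int.mod (m:Int) ((3:Int)^(k+1)))
          (res ++ PySem.Int.toChars (PySem.Int.floordiv (m:Int) ((3:Int)^(k+1))))
        = res ++ pad3 (k+2) m
    have hcast : ((3:Int)^(k+1)) = ((3^(k+1) : Nat) : Int) := by push_cast; ring
    have hdiv : PySem.Int.floordiv (m:Int) ((3:Int)^(k+1)) = ((m / 3^(k+1) : Nat) : Int) := by
      rw [hcast]; exact PySem.Int.floordiv_natCast m (3^(k+1))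
    have hmod : PySem.Int.mod (m:Int) ((3:Int)^(k+1)) = ((m % 3^(k+1) : Nat) : Int) := by
      rw [hcast]; exact PySem.Int.mod_natCast m (3^(k+1))
    have hq : m / 3^(k+1) < 3 := Nat.div_lt_of_lt_mul (by rw [← pow_succ]; exact h)
    rw [hdiv, hmod, toChars_small _ hq,
        ih (m % 3^(k+1)) _ (Nat.mod_lt _ (Nat.pow_pos (by omega : (0:Nat) < 3)))]
    show (res ++ [dchar (m / 3^(k+1))]) ++ pad3 (k+1) (m % 3^(k+1)) = res ++ pad3 (k+2) m
    rw [List.append_assoc]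
    rfl

-- ---- B-side characterisation ----

def depN (m : Nat) : Nat :=
  if 1 < m then depN (m / 3) + 1 else 0
termination_by m
decreasing_by exact Nat.div_lt_self (by omega) (by omega)

def leadN (m : Nat) : Nat :=
  if 1 < m then leadN (m / 3) else m
termination_by m
decreasing_by exact Nat.div_lt_self (by omega) (by omega)

def charsOf (m : Nat) : List Char :=
  if 1 < m then charsOf (m / 3) ++ [dchar (m % 3)] else []
termination_by m
decreasing_by exact Nat.div_lt_self (by omega) (by omega)

theorem bLoop_eq (m : Nat) (s : List Char) :
    bLoop (m : Int) s = ((leadN m : Int), charsOf m ++ s) := by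
  by_cases h : 1 < m
  · have hlt : (1:Int) < (m:Int) := by exact_mod_cast h
    have hl : leadN m = leadN (m / 3) := by
      conv_lhs => rw [leadN]
      rw [if_pos h]
    have hc : charsOf m = charsOf (m / 3) ++ [dchar (m % 3)] := by
      conv_lhs => rw [charsOf]
      rw [if_pos h]
    have hfd : PySem.Int.floordiv (m:Int) 3 = ((m / 3 : Nat) : Int) := by
      exact_mod_cast PySem.Int.floordiv_natCast m 3
    have hmd : PySem.Int.mod (m:Int) 3 = ((m % 3 : Nat) : Int) := by
      exact_mod_cast PySem.Int.mod_natCast m 3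
    rw [bLoop, if_pos hlt, hfd, hmd, toChars_small _ (Nat.mod_lt _ (by omega)),
        bLoop_eq (m / 3), hl, hc]
    simp
  · have hlt : ¬ (1:Int) < (m:Int) := by exact_mod_cast h
    rw [bLoop, if_neg hlt]
    conv_rhs => rw [leadN, charsOf]
    rw [if_neg h, if_neg h]
    simp
termination_by m
decreasing_by exact Nat.div_lt_self (by omega) (by omega)

theorem m_lt_pow_dep (m : Nat) : m < 3^(depN m + 1) := by
  by_cases h : 1 < m
  · rw [depN, if_pos h]
    have ih := m_lt_pow_dep (m / 3)
    have : 3^(depN (m/3) + 1 + 1) = 3 * 3^(depN (m/3) + 1) := by ring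
    have hm : m < 3 * (m / 3) + 3 := by omega
    omega
  · rw [depN, if_neg h]
    have : (3:Nat)^(0+1) = 3 := by norm_num
    omega
termination_by m
decreasing_by exact Nat.div_lt_self (by omega) (by omega)

theorem b_string_eq (m : Nat) :
    PySem.Int.toChars ((leadN m : Nat) : Int) ++ charsOf m = pad3 (depN m + 1) m := by
  by_cases h : 1 < m
  · have ih := b_string_eq (m / 3)
    have hl : leadN m = leadN (m / 3) := by
      conv_lhs => rw [leadN]
      rw [if_pos h]
    have hc : charsOf m = charsOf (m / 3) ++ [dchar (m % 3)] := by
      conv_lhs => rw [charsOf]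
      rw [if_pos h]
    have hd : depN m = depN (m / 3) + 1 := by
      conv_lhs => rw [depN]
      rw [if_pos h]
    rw [hl, hc, hd, ← List.append_assoc, ih, ← pad3_snoc]
  · rw [charsOf, if_neg h]
    conv_lhs => rw [leadN]
    rw [if_neg h]
    conv_rhs => rw [depN]
    rw [if_neg h, toChars_small m (by omega)]
    simp [pad3]
termination_by m
decreasing_by exact Nat.div_lt_self (by omega) (by omega)

-- ===== VERDICT (by name: the statement is the Claim_ definition above) =====
theorem decToTri_spec : Claim_equal_decToTri := by
  intro num _hdom
  unfold Spec_decToTri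
  by_cases h2 : 2 ≤ num
  · -- num ≥ 2: both strings are zero-padded base-3 prints of num; widths may differ
    obtain ⟨m, rfl⟩ := Int.eq_ofNat_of_zero_le (show (0:Int) ≤ num by omega)
    have hm2 : 2 ≤ m := by exact_mod_cast h2
    show (PySem.Int.ofChars? (aLoop (aFindK (m:Int) 0) (m:Int) [])).getD 0
        = (PySem.Int.ofChars? (PySem.Int.toChars (bLoop (m:Int) []).1 ++ (bLoop (m:Int) []).2)).getD 0
    set K := aFindK (m : Int) 0 with hK
    have hpost : ¬ ((3:Int)^K < (m : Int)) := aFindK_post (m : Int) 0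
    have hmK : m < 3^(K+1) := by
      have h1 : ((m:Int)) ≤ ((3^K : Nat) : Int) := by push_cast; omega
      have h2' : m ≤ 3^K := by exact_mod_cast h1
      have : (3:Nat)^(K+1) = 3 * 3^K := by ring
      have h4 : 1 ≤ (3:Nat)^K := Nat.one_le_pow _ _ (by omega)
      omega
    rw [aLoop_eq K m [] hmK, bLoop_eq m []]
    simp only [List.nil_append, List.append_nil]
    rw [b_string_eq m,
        parse_pad3_eq (K+1) (depN m + 1) m (by omega) (by omega) hmK (m_lt_pow_dep m)]
  · -- num ≤ 1: both sides are int(str(num))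
    have hK0 : aFindK num 0 = 0 := by
      rw [aFindK, if_neg (show ¬ ((3:Int)^0 < num) by rw [pow_zero]; omega)]
    show (PySem.Int.ofChars? (aLoop (aFindK num 0) num [])).getD 0
        = (PySem.Int.ofChars? (PySem.Int.toChars (bLoop num []).1 ++ (bLoop num []).2)).getD 0
    rw [hK0]
    show (PySem.Int.ofChars? ([] ++ PySem.Int.toChars (PySem.Int.floordiv num ((3:Int)^0)))).getD 0
        = (PySem.Int.ofChars? (PySem.Int.toChars (bLoop num []).1 ++ (bLoop num []).2)).getD 0
    have hb : bLoop num [] = (num, []) := by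
      rw [bLoop, if_neg (by omega)]
    have hd : PySem.Int.floordiv num ((3:Int)^0) = num := by
      rw [PySem.Int.floordiv_eq_ediv_of_pos (by norm_num)]
      simp
    rw [hb, hd]
    simp
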